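-- pv_equiv track=rewrite | github.com/paiml/depyler | examples/hard_sec_fletcher16.py | fletcher16_batch
-- ===== SOURCE A (Python) =====
-- from typing import List, Tuple
--
-- def fletcher16_batch(chunks: List[List[int]]) -> List[int]:
--     results: List[int] = []
--     for chunk in chunks:
--         s1: int = 0
--         s2: int = 0
--         for byte in chunk:
--             s1 = (s1 + byte) % 255
--             s2 = (s2 + s1) % 255
--         results.append((s2 << 8) | s1)
--     return results
-- ===== SOURCE B (Python) =====
-- from typing import List
--
-- def fletcher16_batch(chunks: List[List[int]]) -> List[int]:
--     results: List[int] = []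
--     for chunk in chunks:
--         n = len(chunk)
--         s1 = sum(chunk) % 255
--         s2 = sum(b * (n - i) for i, b in enumerate(chunk)) % 255
--         results.append((s2 << 8) | s1)
--     return results
-- ===== Notes on version B (the rewrite author's own statement) =====
-- stated objective: alternative
-- what changed: B replaces A's running-accumulator inner loop (s1,s2 updated with a modulo at every byte) by closed-form sums per chunk: s1 = sum(chunk) % 255 and s2 = the positionally weighted sum of bytes reduced mod 255 once.
import Mathlib
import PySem

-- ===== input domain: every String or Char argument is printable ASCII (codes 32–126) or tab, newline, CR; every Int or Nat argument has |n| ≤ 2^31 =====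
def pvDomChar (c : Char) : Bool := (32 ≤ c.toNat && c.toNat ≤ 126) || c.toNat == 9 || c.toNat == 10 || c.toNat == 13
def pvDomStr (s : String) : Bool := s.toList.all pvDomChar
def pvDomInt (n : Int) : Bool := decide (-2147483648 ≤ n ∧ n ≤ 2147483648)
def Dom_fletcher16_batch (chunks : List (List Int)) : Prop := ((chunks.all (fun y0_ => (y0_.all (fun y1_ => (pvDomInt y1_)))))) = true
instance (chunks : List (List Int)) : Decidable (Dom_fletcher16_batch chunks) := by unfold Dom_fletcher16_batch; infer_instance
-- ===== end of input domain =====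

-- B computes each chunk's Fletcher-16 words by closed-form sums (total mod 255 and a
-- positionally weighted sum mod 255) instead of A's running (s1,s2) accumulator; same cost.

-- ===== PORT A =====
def fletcher16_batch (chunks : List (List Int)) : List Int :=
  chunks.foldl (fun results chunk =>
    let p := chunk.foldl (fun (s : Int × Int) byte =>
      let s1 := PySem.Int.mod (s.1 + byte) 255
      let s2 := PySem.Int.mod (s.2 + s1) 255
      (s1, s2)) (0, 0)
    results ++ [PySem.Int.bor (p.2 <<< (8 : Int)) p.1]) []

-- ===== PORT B =====
def fletcher16_batch_alt (chunks : List (List Int)) : List Int :=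
  chunks.foldl (fun results chunk =>
    let n : Int := chunk.length
    let s1 := PySem.Int.mod chunk.sum 255
    let s2 := PySem.Int.mod
      (((PySem.List.enumerate chunk 0).map (fun ib => ib.2 * (n - ib.1))).sum) 255
    results ++ [PySem.Int.bor (s2 <<< (8 : Int)) s1]) []

-- ===== PRECONDITION & SPEC =====
def Spec_fletcher16_batch (chunks : List (List Int)) (out : List Int) : Prop := out = fletcher16_batch_alt chunks
instance (chunks : List (List Int)) (out : List Int) : Decidable (Spec_fletcher16_batch chunks out) := by unfold Spec_fletcher16_batch; infer_instance

-- ===== CLAIM (what is proved, stated in full; the proofs are below) =====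
def Claim_equal_fletcher16_batch : Prop := ∀ (chunks : List (List Int)), Dom_fletcher16_batch chunks → Spec_fletcher16_batch chunks (fletcher16_batch chunks)

-- ===== LEMMAS AND PROOFS =====

-- A's inner-loop step, let-free (definitionally equal to the port's lambda)
def pvStepA (s : Int × Int) (byte : Int) : Int × Int :=
  (PySem.Int.mod (s.1 + byte) 255,
   PySem.Int.mod (s.2 + PySem.Int.mod (s.1 + byte) 255) 255)

-- shifting the enumerate start only shifts the weight base
lemma pv_enum_shift (cs : List Int) : ∀ (s t : Int),
    ((PySem.List.enumerate cs s).map (fun ib => ib.2 * (t - ib.1))).sum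
      = ((PySem.List.enumerate cs 0).map (fun ib => ib.2 * ((t - s) - ib.1))).sum := by
  induction cs with
  | nil => intro s t; simp
  | cons c cs ih =>
      intro s t
      rw [PySem.List.enumerate_cons, PySem.List.enumerate_cons]
      simp only [List.map_cons, List.sum_cons, zero_add]
      rw [ih (s + 1) t, ih 1 (t - s)]
      ring_nf

-- the weighted sum satisfies W (c :: cs) = (len cs + 1) * c + W cs
lemma pv_W_cons (c : Int) (cs : List Int) :
    ((PySem.List.enumerate (c :: cs) 0).map
        (fun ib => ib.2 * (((c :: cs).length : Int) - ib.1))).sum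
      = ((cs.length : Int) + 1) * c
        + ((PySem.List.enumerate cs 0).map (fun ib => ib.2 * ((cs.length : Int) - ib.1))).sum := by
  rw [PySem.List.enumerate_cons]
  simp only [List.map_cons, List.sum_cons, List.length_cons, zero_add]
  rw [pv_enum_shift cs 1 (((cs.length + 1 : Nat) : Int))]
  push_cast
  ring_nf

lemma pv_mod_add_left (a c : Int) :
    PySem.Int.mod (PySem.Int.mod a 255 + c) 255 = PySem.Int.mod (a + c) 255 := by
  rw [PySem.Int.mod_eq_emod_of_pos (by norm_num : (0:Int) < 255),
      PySem.Int.mod_eq_emod_of_pos (by norm_num : (0:Int) < 255),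
      PySem.Int.mod_eq_emod_of_pos (by norm_num : (0:Int) < 255),
      Int.add_emod a c, Int.add_emod (a % 255) c, Int.emod_emod_of_dvd _ (by norm_num)]

-- invariant of A's inner loop, generalized over the incoming accumulators
lemma pv_loopA (chunk : List Int) : ∀ (a b : Int),
    chunk.foldl pvStepA (PySem.Int.mod a 255, PySem.Int.mod b 255)
      = (PySem.Int.mod (a + chunk.sum) 255,
         PySem.Int.mod (b + (chunk.length : Int) * a
           + ((PySem.List.enumerate chunk 0).map
               (fun ib => ib.2 * ((chunk.length : Int) - ib.1))).sum) 255) := by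
  induction chunk with
  | nil => intro a b; simp
  | cons c cs ih =>
      intro a b
      have h1 : PySem.Int.mod (PySem.Int.mod a 255 + c) 255 = PySem.Int.mod (a + c) 255 :=
        pv_mod_add_left a c
      have h2 : PySem.Int.mod (PySem.Int.mod b 255 + PySem.Int.mod (a + c) 255) 255
          = PySem.Int.mod (b + (a + c)) 255 := by
        rw [pv_mod_add_left b (PySem.Int.mod (a + c) 255), Int.add_comm b (PySem.Int.mod (a+c) 255),
            pv_mod_add_left (a + c) b, Int.add_comm (a + c) b]
      rw [List.foldl_cons,
          show pvStepA (PySem.Int.mod a 255, PySem.Int.mod b 255) c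
            = (PySem.Int.mod (a + c) 255, PySem.Int.mod (b + (a + c)) 255) by
            simp only [pvStepA]; rw [h1, h2],
          ih (a + c) (b + (a + c)), pv_W_cons]
      refine Prod.ext ?_ ?_
      · simp only [List.sum_cons]; ring_nf
      · simp only [List.length_cons]; push_cast; ring_nf

-- per-chunk agreement of the two packers
lemma pv_chunk (chunk : List Int) :
    (let p := chunk.foldl (fun (s : Int × Int) byte =>
        let s1 := PySem.Int.mod (s.1 + byte) 255
        let s2 := PySem.Int.mod (s.2 + s1) 255
        (s1, s2)) (0, 0)
     PySem.Int.bor (p.2 <<< (8 : Int)) p.1)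
      = (let n : Int := chunk.length
         let s1 := PySem.Int.mod chunk.sum 255
         let s2 := PySem.Int.mod
           (((PySem.List.enumerate chunk 0).map (fun ib => ib.2 * (n - ib.1))).sum) 255
         PySem.Int.bor (s2 <<< (8 : Int)) s1) := by
  show (let p := chunk.foldl pvStepA (0, 0)
        PySem.Int.bor (p.2 <<< (8 : Int)) p.1) = _
  rw [show ((0 : Int), (0 : Int)) = (PySem.Int.mod 0 255, PySem.Int.mod 0 255) by decide,
      pv_loopA chunk 0 0]
  norm_num

-- ===== VERDICT (by name: the statement is the Claim_ definition above) =====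
theorem fletcher16_batch_spec : Claim_equal_fletcher16_batch := by
  intro chunks _
  unfold Spec_fletcher16_batch fletcher16_batch fletcher16_batch_alt
  rw [PySem.List.foldl_append_singleton_eq_map, PySem.List.foldl_append_singleton_eq_map]
  exact List.map_congr_left (fun chunk _ => pv_chunk chunk)
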